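-- pv_equiv track=rewrite | github.com/Gpossas/Wizards-Auctions | auctions/price.py | currency_format_to_int
-- ===== SOURCE A (Python) =====
-- def currency_format_to_int(price: str) -> int:
--     """
--     transform a string in currency format to int value. A ValueError is raised if string is entirely non-numeric
--     """
--     # edge-cases: price = '' -> 0; price = '-1' -> 1; price = 'fgh' -> raise ValueError;
--
--     value = ''
--     for char in price:
--         if '0' <= char <= '9':
--             value = ''.join((value, char))
--     if value:
--         return int(value)
--     else:
--         raise ValueError('argument entirely non-numeric')
-- ===== SOURCE B (Python) =====
-- def currency_format_to_int(price: str) -> int: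
--     """
--     transform a string in currency format to int value. A ValueError is raised if string is entirely non-numeric
--     """
--     n = 0
--     found = False
--     for char in price:
--         if '0' <= char <= '9':
--             n = n * 10 + (ord(char) - ord('0'))
--             found = True
--     if found:
--         return n
--     raise ValueError('argument entirely non-numeric')
-- ===== Notes on version B (the rewrite author's own statement) =====
-- stated objective: alternative
-- what changed: replaces building a digit string and parsing it with int() by a single pass that maintains an integer accumulator n = n*10 + digit and a found flag, so no intermediate string and no parse step exist
import Mathlib
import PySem

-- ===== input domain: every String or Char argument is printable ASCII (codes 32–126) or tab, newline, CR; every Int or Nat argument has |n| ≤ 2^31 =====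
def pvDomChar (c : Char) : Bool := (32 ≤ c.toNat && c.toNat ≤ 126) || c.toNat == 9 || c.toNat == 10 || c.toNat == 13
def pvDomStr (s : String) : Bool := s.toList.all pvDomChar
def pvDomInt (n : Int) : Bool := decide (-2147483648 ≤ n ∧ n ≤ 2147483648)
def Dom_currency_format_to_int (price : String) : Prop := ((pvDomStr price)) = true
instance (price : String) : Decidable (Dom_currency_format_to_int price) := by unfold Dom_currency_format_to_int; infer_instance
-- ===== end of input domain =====

-- B replaces A's build-a-digit-string-then-int() strategy by one pass that maintains an
-- integer accumulator (n = n*10 + digit) and a found flag (objective: alternative).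


-- ===== PORT A =====
-- hand port of Python's int() RESTRICTED to the strings A feeds it: `value` is by construction
-- a nonempty string of chars '0'..'9' only, and on those int() is exactly the left-to-right
-- decimal fold below (no sign/space/underscore can occur; PySem's full int() parser is not
-- needed for this argument shape).
def pyIntAllDigits (value : List Char) : Int :=
  value.foldl (fun n c => n * 10 + ((c.toNat : Int) - 48)) 0

def currency_format_to_int (price : String) : Int :=
  -- value = ''; for char in price: if '0' <= char <= '9': value = ''.join((value, char))
  let value : List Char :=
    price.toList.foldl (fun value char => if '0' ≤ char ∧ char ≤ '9' then value ++ [char] else value) []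
  -- if value: return int(value) else: raise ValueError  (the raise is excluded by Pre_)
  if value ≠ [] then pyIntAllDigits value else 0

-- ===== PORT B =====
def currency_format_to_int_alt (price : String) : Int :=
  -- n = 0; found = False; for char in price: if '0' <= char <= '9': n = n*10 + (ord(char)-48); found = True
  let st : Int × Bool :=
    price.toList.foldl
      (fun (st : Int × Bool) char =>
        if '0' ≤ char ∧ char ≤ '9' then (st.1 * 10 + ((char.toNat : Int) - 48), true) else st)
      (0, false)
  -- if found: return n else: raise ValueError  (the raise is excluded by Pre_)
  if st.2 then st.1 else 0

-- ===== PRECONDITION & SPEC =====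
-- A (and B) raise ValueError exactly when price contains no decimal digit; Pre_ excludes those.
def Pre_currency_format_to_int (price : String) : Prop :=
  price.toList.any (fun c => decide ('0' ≤ c ∧ c ≤ '9')) = true
instance (price : String) : Decidable (Pre_currency_format_to_int price) := by
  unfold Pre_currency_format_to_int; infer_instance

def pvWitness_currency_format_to_int : String := "$1,234.56"

def Spec_currency_format_to_int (price : String) (out : Int) : Prop := out = currency_format_to_int_alt price
instance (price : String) (out : Int) : Decidable (Spec_currency_format_to_int price out) := by
  unfold Spec_currency_format_to_int; infer_instance

-- ===== CLAIM (what is proved, stated in full; the proofs are below) =====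
def Claim_equal_currency_format_to_int : Prop := ∀ (price : String), Dom_currency_format_to_int price → Pre_currency_format_to_int price → Spec_currency_format_to_int price (currency_format_to_int price)

-- ===== LEMMAS AND PROOFS =====

-- B's fold over the whole string, started from any state, is A's digit fold over the filtered
-- digits together with the flag saying whether a digit was seen.
theorem pvAltFold_eq (cs : List Char) (n : Int) (b : Bool) :
    cs.foldl
      (fun (st : Int × Bool) char =>
        if '0' ≤ char ∧ char ≤ '9' then (st.1 * 10 + ((char.toNat : Int) - 48), true) else st)
      (n, b)
    = ((cs.filter (fun c => decide ('0' ≤ c ∧ c ≤ '9'))).foldl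
        (fun n c => n * 10 + ((c.toNat : Int) - 48)) n,
       b || !(cs.filter (fun c => decide ('0' ≤ c ∧ c ≤ '9'))).isEmpty) := by
  induction cs generalizing n b with
  | nil => simp
  | cons c cs ih =>
    by_cases h : '0' ≤ c ∧ c ≤ '9' <;>
      simp [List.foldl_cons, List.filter_cons, h, ih]

-- ===== VERDICT (by name: the statement is the Claim_ definition above) =====

theorem currency_format_to_int_spec : Claim_equal_currency_format_to_int := by
  intro price _ hpre
  unfold Spec_currency_format_to_int currency_format_to_int currency_format_to_int_alt
  rw [PySem.List.foldl_append_ite_eq_filter (fun c => '0' ≤ c ∧ c ≤ '9') price.toList []]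
  rw [pvAltFold_eq]
  have hne : price.toList.filter (fun c => decide ('0' ≤ c ∧ c ≤ '9')) ≠ [] := by
    unfold Pre_currency_format_to_int at hpre
    rw [List.any_eq_true] at hpre
    obtain ⟨x, hx, hpx⟩ := hpre
    intro hnil
    exact (List.filter_eq_nil_iff.mp hnil) x hx hpx
  simp [pyIntAllDigits, hne]
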